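-- pv_equiv track=rewrite | github.com/AliMurtazaJaffery/Notakto | notakto.py | count_x
-- ===== SOURCE A (Python) =====
-- def count_x(dictionary):
--     count=0
--     for k in dictionary:
--         for i, x in enumerate(dictionary[k]):
--             for j, y in enumerate(x):
--                 if dictionary[k][i][j]=='X':
--                     count+=1
--     return count
-- ===== SOURCE B (Python) =====
-- def count_x(dictionary):
--     cells = []
--     for grid in dictionary.values():
--         for row in grid:
--             cells += row
--     return cells.count('X')
-- ===== Notes on version B (the rewrite author's own statement) =====
-- stated objective: alternative
-- what changed: A's single triple-nested pass with a per-cell comparison and running counter is replaced by a staged algorithm: phase 1 materializes the flattened list of all cells (no comparisons), phase 2 does one count call on that flat list; a Pre_ excludes association lists with duplicate keys, which no real Python dict input can have.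
import Mathlib
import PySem

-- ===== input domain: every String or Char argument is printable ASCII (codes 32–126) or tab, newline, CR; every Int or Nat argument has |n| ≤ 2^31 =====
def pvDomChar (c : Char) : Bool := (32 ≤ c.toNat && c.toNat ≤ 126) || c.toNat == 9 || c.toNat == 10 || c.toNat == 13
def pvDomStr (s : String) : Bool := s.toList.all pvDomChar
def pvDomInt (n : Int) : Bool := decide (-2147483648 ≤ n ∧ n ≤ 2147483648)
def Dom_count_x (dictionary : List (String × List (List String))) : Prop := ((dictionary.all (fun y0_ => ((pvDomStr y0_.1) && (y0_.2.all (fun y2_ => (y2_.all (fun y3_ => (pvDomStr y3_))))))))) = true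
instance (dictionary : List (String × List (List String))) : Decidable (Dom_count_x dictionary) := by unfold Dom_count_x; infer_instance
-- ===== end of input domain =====

-- B replaces A's single nested counting pass (per-cell comparison + running counter) by a staged
-- algorithm: first materialize the flattened list of all cells, then one count call on it (return value only).

-- ===== PORT A =====
def count_x (dictionary : List (String × List (List String))) : Int :=
  (dictionary.map Prod.fst).foldl (fun count k =>
    (PySem.List.enumerate ((PySem.Dict.mk dictionary).getD k [])).foldl (fun count ix =>
      (PySem.List.enumerate ix.2).foldl (fun count jy =>
        if PySem.List.pyGetD (PySem.List.pyGetD ((PySem.Dict.mk dictionary).getD k []) ix.1 []) jy.1 "" == "X"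
        then count + 1 else count) count) count) 0

-- ===== PORT B =====
def count_x_alt (dictionary : List (String × List (List String))) : Int :=
  -- phase 1: cells = []; for grid in values: for row in grid: cells += row
  let cells := (PySem.Dict.mk dictionary).values.foldl
    (fun cells grid => grid.foldl (fun cells row => cells ++ row) cells) ([] : List String)
  -- phase 2: cells.count('X')
  (PySem.List.count cells "X" : Int)

-- ===== PRECONDITION & SPEC =====
-- Pre_ excludes association lists with duplicate keys: a Python dict cannot contain them (insertion
-- overwrites), so they encode no actual input of A; A's first-match lookup there is an encoding artefact.
def Pre_count_x (dictionary : List (String × List (List String))) : Prop :=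
  (dictionary.map Prod.fst).Nodup
instance (dictionary : List (String × List (List String))) : Decidable (Pre_count_x dictionary) := by unfold Pre_count_x; infer_instance
def pvWitness_count_x : (List (String × List (List String))) := [("a", [["X", "O"], ["X"]]), ("b", [[]])]
def Spec_count_x (dictionary : List (String × List (List String))) (out : Int) : Prop := out = count_x_alt dictionary
instance (dictionary : List (String × List (List String))) (out : Int) : Decidable (Spec_count_x dictionary out) := by unfold Spec_count_x; infer_instance

-- ===== CLAIM (what is proved, stated in full; the proofs are below) =====
def Claim_equal_count_x : Prop := ∀ (dictionary : List (String × List (List String))), Dom_count_x dictionary → Pre_count_x dictionary → Spec_count_x dictionary (count_x dictionary)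

-- ===== LEMMAS AND PROOFS =====

-- A's innermost loop over one row (enumerate + re-indexing) counts the 'X' cells of that row.
lemma pv_row_loop (row : List String) (c : Int) :
    (PySem.List.enumerate row).foldl (fun count jy =>
      if PySem.List.pyGetD row jy.1 "" == "X" then count + 1 else count) c
    = c + (row.count "X" : Int) := by
  have h1 : (PySem.List.enumerate row).foldl (fun count jy =>
      if PySem.List.pyGetD row jy.1 "" == "X" then count + 1 else count) c
    = (PySem.List.enumerate row).foldl (fun count jy => if jy.2 == "X" then count + 1 else count) c := by
    apply PySem.List.foldl_congr_mem
    intro acc jy hjy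
    rcases (PySem.List.mem_enumerate_iff _ _ _).1 hjy with ⟨k, hk, rfl⟩
    simp [PySem.List.pyGetD_natCast, List.getD_eq_getElem?_getD, hk]
  rw [h1, show (PySem.List.enumerate row).foldl (fun count jy => if jy.2 == "X" then count + 1 else count) c
      = ((PySem.List.enumerate row).map (·.2)).foldl (fun count y => if y == "X" then count + 1 else count) c by
    rw [List.foldl_map]]
  rw [PySem.List.map_snd_enumerate, PySem.List.foldl_beq_add_one]

-- A's two inner loops over one grid sum the per-row 'X' counts of that grid.
lemma pv_grid_loop (grid : List (List String)) (c : Int) :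
    (PySem.List.enumerate grid).foldl (fun count ix =>
      (PySem.List.enumerate ix.2).foldl (fun count jy =>
        if PySem.List.pyGetD (PySem.List.pyGetD grid ix.1 []) jy.1 "" == "X"
        then count + 1 else count) count) c
    = c + (grid.map (fun row => (row.count "X" : Int))).sum := by
  have h1 : (PySem.List.enumerate grid).foldl (fun count ix =>
      (PySem.List.enumerate ix.2).foldl (fun count jy =>
        if PySem.List.pyGetD (PySem.List.pyGetD grid ix.1 []) jy.1 "" == "X"
        then count + 1 else count) count) c
    = (PySem.List.enumerate grid).foldl (fun count ix => count + (ix.2.count "X" : Int)) c := by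
    apply PySem.List.foldl_congr_mem
    intro acc ix hix
    rcases (PySem.List.mem_enumerate_iff _ _ _).1 hix with ⟨k, hk, rfl⟩
    have hidx : PySem.List.pyGetD grid ((0 : Int) + (k : Int)) [] = grid[k] := by
      simp [PySem.List.pyGetD_natCast, List.getD_eq_getElem?_getD, hk]
    rw [show (fun (count : Int) (jy : Int × String) =>
        if PySem.List.pyGetD (PySem.List.pyGetD grid ((0:Int) + (k:Int), grid[k]).1 []) jy.1 "" == "X"
        then count + 1 else count)
      = fun (count : Int) jy => if PySem.List.pyGetD grid[k] jy.1 "" == "X" then count + 1 else count by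
        funext count jy; rw [hidx]]
    exact pv_row_loop _ _
  rw [h1, show (PySem.List.enumerate grid).foldl (fun count ix => count + (ix.2.count "X" : Int)) c
      = ((PySem.List.enumerate grid).map (·.2)).foldl (fun count row => count + (row.count "X" : Int)) c by
    rw [List.foldl_map]]
  rw [PySem.List.map_snd_enumerate, PySem.List.foldl_add]

-- B's inner loop over one grid appends that grid's flattening.
lemma pv_flat_grid (grid : List (List String)) (cells : List String) :
    grid.foldl (fun cells row => cells ++ row) cells = cells ++ grid.flatten := by
  induction grid generalizing cells with
  | nil => simp
  | cons r rest ih => simp [List.foldl_cons, ih, List.append_assoc]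

-- B's phase 1 builds the flattening of all grids' flattenings.
lemma pv_flat_all (vs : List (List (List String))) (cells : List String) :
    vs.foldl (fun cells grid => grid.foldl (fun cells row => cells ++ row) cells) cells
    = cells ++ (vs.map List.flatten).flatten := by
  induction vs generalizing cells with
  | nil => simp
  | cons g rest ih => simp [List.foldl_cons, pv_flat_grid, List.append_assoc]

-- ===== VERDICT (by name: the statement is the Claim_ definition above) =====
theorem count_x_spec : Claim_equal_count_x := by
  intro d _ h
  unfold Spec_count_x count_x count_x_alt
  rw [List.foldl_map]
  have h1 : d.foldl (fun count kv =>
      (PySem.List.enumerate ((PySem.Dict.mk d).getD kv.1 [])).foldl (fun count ix =>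
        (PySem.List.enumerate ix.2).foldl (fun count jy =>
          if PySem.List.pyGetD (PySem.List.pyGetD ((PySem.Dict.mk d).getD kv.1 []) ix.1 []) jy.1 "" == "X"
          then count + 1 else count) count) count) 0
    = d.foldl (fun count kv => count + (kv.2.map (fun row => (row.count "X" : Int))).sum) 0 := by
    apply PySem.List.foldl_congr_mem
    intro acc kv hkv
    have hget : (PySem.Dict.mk d).getD kv.1 [] = kv.2 := by
      apply PySem.Dict.getD_of_mem_items
      · simpa using hkv
      · simpa using h
    rw [hget]
    exact pv_grid_loop _ _
  rw [h1, PySem.List.foldl_add]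
  simp only [pv_flat_all, List.nil_append, PySem.List.count_eq, List.count_flatten,
    PySem.Dict.values, List.map_map]
  push_cast
  rw [zero_add, List.map_map]
  apply congrArg List.sum
  apply List.map_congr_left
  intro kv _
  simp [List.count_flatten, List.map_map, Function.comp]
  rfl
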